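-- pv_equiv track=rewrite | github.com/HeshamAbedelatty/Building-a-process-discovery-technique-Alpha-algorithm- | process discovery technique (Alpha algorithm).py | getFootprint
-- ===== SOURCE A (Python) =====
-- def getFootprint(Causality, Parallelism, Transitions):
--     res = {}
--     for i in Transitions:
--         res[i] = {}
--     reveredCausality = []
--     for x, y in Causality:
--         reveredCausality.append((y, x))
--     for i in Transitions:
--         for j in Transitions:
--             if (i, j) in Causality:
--                 res[i][j] = 1
--             elif (i, j) in Parallelism:
--                 res[i][j] = 3
--             elif (i, j) in reveredCausality:
--                 res[i][j] = 2
--             else: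
--                 res[i][j] = 0
--     #     dict(sorted(res[i].items()))
--     # dict(sorted(res.items()))
--     return res
-- ===== SOURCE B (Python) =====
-- def getFootprint(Causality, Parallelism, Transitions):
--     res = {i: {j: 0 for j in Transitions} for i in Transitions}
--     for x, y in Causality:
--         if y in res and x in res:
--             res[y][x] = 2
--     for x, y in Parallelism:
--         if x in res and y in res:
--             res[x][y] = 3
--     for x, y in Causality:
--         if x in res and y in res:
--             res[x][y] = 1
--     return res
-- ===== Notes on version B (the rewrite author's own statement) =====
-- stated objective: faster
-- what changed: Instead of scanning the Causality/Parallelism lists for every transition pair, B builds the all-zero footprint matrix once and then makes three linear passes over the relation lists (reversed causality writes 2, then parallelism 3, then causality 1, so the last write reproduces A's elif priority), guarding each write by key membership.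
import Mathlib
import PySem

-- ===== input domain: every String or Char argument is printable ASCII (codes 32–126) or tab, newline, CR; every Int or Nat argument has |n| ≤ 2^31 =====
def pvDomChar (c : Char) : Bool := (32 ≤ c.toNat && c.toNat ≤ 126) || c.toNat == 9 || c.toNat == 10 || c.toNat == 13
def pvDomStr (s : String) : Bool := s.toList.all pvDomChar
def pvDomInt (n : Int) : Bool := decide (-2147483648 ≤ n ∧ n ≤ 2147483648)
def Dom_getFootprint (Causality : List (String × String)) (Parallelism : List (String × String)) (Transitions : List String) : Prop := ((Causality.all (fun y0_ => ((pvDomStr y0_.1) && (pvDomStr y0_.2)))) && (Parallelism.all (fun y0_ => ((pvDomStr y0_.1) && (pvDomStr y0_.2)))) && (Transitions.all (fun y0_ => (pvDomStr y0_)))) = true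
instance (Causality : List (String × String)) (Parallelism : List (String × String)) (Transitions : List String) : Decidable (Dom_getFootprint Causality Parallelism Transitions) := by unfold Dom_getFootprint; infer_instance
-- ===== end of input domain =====

-- B replaces A's nested pair-loop membership scans by one full zero initialization plus three
-- linear passes over the relation lists (reversed causality 2, parallelism 3, causality 1;
-- the last write reproduces A's elif priority): an asymptotically cheaper algorithm.


-- ===== PORT A =====
def getFootprint (Causality : List (String × String)) (Parallelism : List (String × String)) (Transitions : List String) : List (String × List (String × Int)) :=
  let res0 : PySem.Dict String (PySem.Dict String Int) :=
    Transitions.foldl (fun r i => r.insert i PySem.Dict.empty) PySem.Dict.empty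
  let reveredCausality : List (String × String) :=
    Causality.foldl (fun l p => l ++ [(p.2, p.1)]) []
  let res : PySem.Dict String (PySem.Dict String Int) :=
    Transitions.foldl (fun r i =>
      Transitions.foldl (fun r j =>
        r.modify i PySem.Dict.empty (fun d => d.insert j
          (if (i, j) ∈ Causality then (1 : Int)
           else if (i, j) ∈ Parallelism then 3
           else if (i, j) ∈ reveredCausality then 2
           else 0))) r) res0
  res.items.map (fun p => (p.1, p.2.items))

-- ===== PORT B =====
def getFootprint_alt (Causality : List (String × String)) (Parallelism : List (String × String)) (Transitions : List String) : List (String × List (String × Int)) :=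
  let res0 : PySem.Dict String (PySem.Dict String Int) :=
    Transitions.foldl (fun r i =>
      r.insert i (Transitions.foldl (fun d j => d.insert j (0 : Int)) PySem.Dict.empty)) PySem.Dict.empty
  let res1 := Causality.foldl (fun r p =>
    if r.contains p.2 && r.contains p.1 then r.modify p.2 PySem.Dict.empty (fun d => d.insert p.1 2) else r) res0
  let res2 := Parallelism.foldl (fun r p =>
    if r.contains p.1 && r.contains p.2 then r.modify p.1 PySem.Dict.empty (fun d => d.insert p.2 3) else r) res1
  let res3 := Causality.foldl (fun r p =>
    if r.contains p.1 && r.contains p.2 then r.modify p.1 PySem.Dict.empty (fun d => d.insert p.2 1) else r) res2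
  res3.items.map (fun p => (p.1, p.2.items))

-- ===== PRECONDITION & SPEC =====
def Spec_getFootprint (Causality : List (String × String)) (Parallelism : List (String × String)) (Transitions : List String) (out : List (String × List (String × Int))) : Prop := out = getFootprint_alt Causality Parallelism Transitions
instance (Causality : List (String × String)) (Parallelism : List (String × String)) (Transitions : List String) (out : List (String × List (String × Int))) : Decidable (Spec_getFootprint Causality Parallelism Transitions out) := by unfold Spec_getFootprint; infer_instance

-- ===== CLAIM (what is proved, stated in full; the proofs are below) =====
def Claim_equal_getFootprint : Prop := ∀ (Causality : List (String × String)) (Parallelism : List (String × String)) (Transitions : List String), Dom_getFootprint Causality Parallelism Transitions → Spec_getFootprint Causality Parallelism Transitions (getFootprint Causality Parallelism Transitions)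

-- ===== LEMMAS AND PROOFS =====

-- the footprint value of the cell (i, j), and the canonical row / result both programs compute
def fpVal (C P : List (String × String)) (i j : String) : Int :=
  if (i, j) ∈ C then 1 else if (i, j) ∈ P then 3 else if (j, i) ∈ C then 2 else 0

def fpRow (C P : List (String × String)) (T : List String) (i : String) : PySem.Dict String Int :=
  T.foldl (fun d j => d.insert j (fpVal C P i j)) PySem.Dict.empty

def fpOut (C P : List (String × String)) (T : List String) : List (String × List (String × Int)) :=
  (PySem.Set.ofList T).map (fun i => (i, (fpRow C P T i).items))

lemma getD_foldl_insert_const {ν : Type} (T : List String) (c : ν) (d : PySem.Dict String ν) (k : String) (d0 : ν) :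
    (T.foldl (fun r i => r.insert i c) d).getD k d0 = if k ∈ T then c else d.getD k d0 := by
  induction T generalizing d with
  | nil => simp
  | cons i T ih =>
    simp only [List.foldl_cons, ih, PySem.Dict.getD_insert, List.mem_cons]
    split_ifs <;> tauto

lemma get?_foldl_insert_fun {ν : Type} (T : List String) (g : String → ν) (d : PySem.Dict String ν) (k : String) :
    (T.foldl (fun d j => d.insert j (g j)) d).get? k = if k ∈ T then some (g k) else d.get? k := by
  induction T generalizing d with
  | nil => simp
  | cons i T ih =>
    simp only [List.foldl_cons, ih, PySem.Dict.get?_insert, List.mem_cons]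
    by_cases hk : k ∈ T <;> by_cases hi : k = i <;> simp [hk, hi]

lemma getD_foldl_insert_fun {ν : Type} (T : List String) (g : String → ν) (d : PySem.Dict String ν) (k : String) (d0 : ν) :
    (T.foldl (fun d j => d.insert j (g j)) d).getD k d0 = if k ∈ T then g k else d.getD k d0 := by
  rw [PySem.Dict.getD_eq_get?_getD, get?_foldl_insert_fun, PySem.Dict.getD_eq_get?_getD]
  split_ifs <;> rfl

lemma insert_eq_self {ν : Type} {d : PySem.Dict String ν} {k : String} {v : ν}
    (hn : d.keys.Nodup) (h : d.get? k = some v) : d.insert k v = d := by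
  apply PySem.Dict.ext
  rw [PySem.Dict.items_insert_of_contains d v (by rw [PySem.Dict.contains_eq_isSome_get?, h]; rfl)]
  conv_rhs => rw [← List.map_id d.items]
  apply List.map_congr_left
  intro p hp
  by_cases hpk : p.1 = k
  · have h2 : d.get? p.1 = some p.2 := PySem.Dict.get?_of_mem_items d (by simpa using hp) hn
    rw [hpk, h] at h2
    have hv : v = p.2 := Option.some.inj h2
    rw [if_pos (by simp [hpk]), hv, ← hpk, id]
  · simp [hpk]

lemma foldl_insert_stable {ν : Type} (T : List String) (g : String → ν) (d : PySem.Dict String ν)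
    (hn : d.keys.Nodup) (h : ∀ j ∈ T, d.get? j = some (g j)) :
    T.foldl (fun d j => d.insert j (g j)) d = d := by
  induction T with
  | nil => rfl
  | cons i T ih =>
    simp only [List.foldl_cons]
    rw [insert_eq_self hn (h i (by simp))]
    exact ih (fun j hj => h j (by simp [hj]))

lemma keys_foldl_inv {α ν : Type} (L : List α) (step : PySem.Dict String ν → α → PySem.Dict String ν) (K : List String)
    (hstep : ∀ r x, x ∈ L → r.keys = K → (step r x).keys = K) :
    ∀ r : PySem.Dict String ν, r.keys = K → (L.foldl step r).keys = K := by
  induction L with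
  | nil => intro r h; exact h
  | cons x L ih =>
    intro r h
    exact ih (fun r y hy hr => hstep r y (by simp [hy]) hr) _ (hstep r x (by simp) h)

lemma keys_modify_mem {ν : Type} (r : PySem.Dict String ν) (i : String) (d0 : ν) (f : ν → ν)
    (h : i ∈ r.keys) : (r.modify i d0 f).keys = r.keys := by
  rw [PySem.Dict.keys_modify, PySem.Dict.keys_insert_of_contains _ _ ((PySem.Dict.contains_iff_mem_keys r i).mpr h)]

lemma getD_modify_insert_loop (T : List String) (i : String) (g : String → Int)
    (r : PySem.Dict String (PySem.Dict String Int)) (k : String) :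
    (T.foldl (fun r j => r.modify i PySem.Dict.empty (fun d => d.insert j (g j))) r).getD k PySem.Dict.empty
      = if k = i then T.foldl (fun d j => d.insert j (g j)) (r.getD i PySem.Dict.empty)
        else r.getD k PySem.Dict.empty := by
  induction T generalizing r with
  | nil => simp only [List.foldl_nil]; split_ifs with h <;> simp [h]
  | cons j T ih =>
    simp only [List.foldl_cons, ih, PySem.Dict.getD_modify]
    by_cases hk : k = i <;> simp [hk]

lemma canon_get? (T : List String) (g : String → Int) (j : String) :
    (T.foldl (fun d j => d.insert j (g j)) (PySem.Dict.empty : PySem.Dict String Int)).get? j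
      = if j ∈ T then some (g j) else none := by
  rw [get?_foldl_insert_fun]; simp [PySem.Dict.get?_empty]

lemma canon_nodup (T : List String) (g : String → Int) :
    (T.foldl (fun d j => d.insert j (g j)) (PySem.Dict.empty : PySem.Dict String Int)).keys.Nodup :=
  PySem.Dict.nodup_keys_foldl_insert T (fun _ j => g j) _ (by simp [PySem.Dict.keys_empty])

lemma outerA_getD (T' T : List String) (g : String → String → Int) :
    ∀ (r : PySem.Dict String (PySem.Dict String Int)) (k : String),
    (r.getD k PySem.Dict.empty = PySem.Dict.empty ∨
       r.getD k PySem.Dict.empty = T.foldl (fun d j => d.insert j (g k j)) PySem.Dict.empty) →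
    (T'.foldl (fun r i => T.foldl (fun r j =>
        r.modify i PySem.Dict.empty (fun d => d.insert j (g i j))) r) r).getD k PySem.Dict.empty
      = if k ∈ T' then T.foldl (fun d j => d.insert j (g k j)) PySem.Dict.empty
        else r.getD k PySem.Dict.empty := by
  induction T' with
  | nil => intro r k _; simp
  | cons i T' ih =>
    intro r k hk
    simp only [List.foldl_cons]
    set r' := T.foldl (fun r j => r.modify i PySem.Dict.empty (fun d => d.insert j (g i j))) r with hr'
    have hgetr' : ∀ k', r'.getD k' PySem.Dict.empty
        = if k' = i then T.foldl (fun d j => d.insert j (g i j)) (r.getD i PySem.Dict.empty)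
          else r.getD k' PySem.Dict.empty := fun k' => getD_modify_insert_loop T i (g i) r k'
    by_cases hki : k = i
    · subst hki
      have hrow : r'.getD k PySem.Dict.empty = T.foldl (fun d j => d.insert j (g k j)) PySem.Dict.empty := by
        rw [hgetr' k, if_pos rfl]
        rcases hk with h | h
        · rw [h]
        · rw [h]
          exact foldl_insert_stable T (g k) _ (canon_nodup T (g k))
            (fun j hj => by rw [canon_get?, if_pos hj])
      rw [ih r' k (Or.inr hrow)]
      by_cases hkT : k ∈ T' <;> simp [hkT, hrow]
    · have h2 : r'.getD k PySem.Dict.empty = r.getD k PySem.Dict.empty := by rw [hgetr' k, if_neg hki]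
      rw [ih r' k (h2 ▸ hk), h2]
      simp [List.mem_cons, hki]

lemma passB (L : List (String × String)) (tgt src : String × String → String) (v : Int) (K : List String) :
    ∀ (r : PySem.Dict String (PySem.Dict String Int)), r.keys = K →
    (L.foldl (fun r p => if r.contains (tgt p) && r.contains (src p)
        then r.modify (tgt p) PySem.Dict.empty (fun d => d.insert (src p) v) else r) r).keys = K
    ∧ ∀ k, (L.foldl (fun r p => if r.contains (tgt p) && r.contains (src p)
        then r.modify (tgt p) PySem.Dict.empty (fun d => d.insert (src p) v) else r) r).getD k PySem.Dict.empty
      = L.foldl (fun d p => if (tgt p ∈ K ∧ src p ∈ K) ∧ tgt p = k then d.insert (src p) v else d)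
          (r.getD k PySem.Dict.empty) := by
  induction L with
  | nil => intro r hr; exact ⟨hr, fun k => rfl⟩
  | cons p L ih =>
    intro r hr
    have hc1 : r.contains (tgt p) = decide (tgt p ∈ K) := by
      rw [PySem.Dict.contains_eq_decide_mem_keys, hr]
    have hc2 : r.contains (src p) = decide (src p ∈ K) := by
      rw [PySem.Dict.contains_eq_decide_mem_keys, hr]
    by_cases hg : tgt p ∈ K ∧ src p ∈ K
    · have hstep : (if r.contains (tgt p) && r.contains (src p)
          then r.modify (tgt p) PySem.Dict.empty (fun d => d.insert (src p) v) else r)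
          = r.modify (tgt p) PySem.Dict.empty (fun d => d.insert (src p) v) := by
        simp [hc1, hc2, hg.1, hg.2]
      have hkeys' : (r.modify (tgt p) PySem.Dict.empty (fun d => d.insert (src p) v)).keys = K := by
        rw [keys_modify_mem _ _ _ _ (hr ▸ hg.1), hr]
      obtain ⟨hK, hG⟩ := ih _ hkeys'
      rw [List.foldl_cons, hstep]
      refine ⟨hK, fun k => ?_⟩
      rw [List.foldl_cons, hG k]
      congr 1
      rw [PySem.Dict.getD_modify]
      by_cases hk : k = tgt p
      · rw [if_pos hk, if_pos ⟨hg, hk.symm⟩, hk]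
      · rw [if_neg hk, if_neg (by rintro ⟨_, h⟩; exact hk h.symm)]
    · have hstep : (if r.contains (tgt p) && r.contains (src p)
          then r.modify (tgt p) PySem.Dict.empty (fun d => d.insert (src p) v) else r) = r := by
        have : (r.contains (tgt p) && r.contains (src p)) = false := by
          rw [hc1, hc2]
          rcases Decidable.not_and_iff_not_or_not.mp hg with h | h <;> simp [h]
        simp [this]
      obtain ⟨hK, hG⟩ := ih _ hr
      rw [List.foldl_cons, hstep]
      refine ⟨hK, fun k => ?_⟩
      rw [List.foldl_cons, hG k, if_neg (by rintro ⟨h, _⟩; exact hg h)]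

lemma getD_foldl_cond_insert {α : Type} (L : List α) (c : α → Prop) [DecidablePred c] (xf : α → String)
    (v : Int) (d : PySem.Dict String Int) (j : String) (d0 : Int) :
    (L.foldl (fun d p => if c p then d.insert (xf p) v else d) d).getD j d0
      = if (∃ p ∈ L, c p ∧ xf p = j) then v else d.getD j d0 := by
  induction L generalizing d with
  | nil => simp
  | cons p L ih =>
    rw [List.foldl_cons, ih]
    by_cases hL : ∃ q ∈ L, c q ∧ xf q = j
    · obtain ⟨q, hq, h⟩ := hL
      rw [if_pos ⟨q, hq, h⟩, if_pos ⟨q, List.mem_cons_of_mem p hq, h⟩]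
    · rw [if_neg hL]
      by_cases hp : c p ∧ xf p = j
      · have hex : ∃ q ∈ p :: L, c q ∧ xf q = j := ⟨p, List.mem_cons_self .., hp⟩
        rw [if_pos hex, if_pos hp.1, PySem.Dict.getD_insert, if_pos hp.2.symm]
      · have hex : ¬ ∃ q ∈ p :: L, c q ∧ xf q = j := by
          rintro ⟨q, hq, h⟩
          rcases List.mem_cons.mp hq with rfl | hq'
          · exact hp h
          · exact hL ⟨q, hq', h⟩
        rw [if_neg hex]
        by_cases hcp : c p
        · rw [if_pos hcp, PySem.Dict.getD_insert, if_neg (fun h => hp ⟨hcp, h.symm⟩)]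
        · rw [if_neg hcp]

lemma keys_foldl_cond_insert {α : Type} (L : List α) (c : α → Prop) [DecidablePred c] (xf : α → String)
    (v : Int) (K : List String) (h : ∀ p, c p → xf p ∈ K) :
    ∀ d : PySem.Dict String Int, d.keys = K →
    (L.foldl (fun d p => if c p then d.insert (xf p) v else d) d).keys = K := by
  induction L with
  | nil => intro d hd; exact hd
  | cons p L ih =>
    intro d hd
    rw [List.foldl_cons]
    apply ih
    by_cases hc : c p
    · rw [if_pos hc, PySem.Dict.keys_insert_of_contains _ _
        ((PySem.Dict.contains_iff_mem_keys d (xf p)).mpr (hd ▸ h p hc))]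
      exact hd
    · rw [if_neg hc]; exact hd

lemma mem_swap_map (C : List (String × String)) (i j : String) :
    (i, j) ∈ C.map (fun p => (p.2, p.1)) ↔ (j, i) ∈ C := by
  constructor
  · rintro h
    obtain ⟨p, hp, he⟩ := List.mem_map.mp h
    obtain ⟨h1, h2⟩ := Prod.mk.injEq .. ▸ he
    simpa [← h1, ← h2] using hp
  · intro h
    exact List.mem_map.mpr ⟨(j, i), h, rfl⟩

lemma A_eq (C P : List (String × String)) (T : List String) :
    getFootprint C P T = fpOut C P T := by
  simp only [getFootprint]
  have hrev : C.foldl (fun l p => l ++ [(p.2, p.1)]) ([] : List (String × String))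
      = C.map (fun p => (p.2, p.1)) := by
    simpa using PySem.List.foldl_append_singleton_eq_map (fun p : String × String => (p.2, p.1)) C []
  rw [hrev]
  have hval : ∀ i j : String,
      (if (i, j) ∈ C then (1 : Int) else if (i, j) ∈ P then 3
       else if (i, j) ∈ C.map (fun p => (p.2, p.1)) then 2 else 0) = fpVal C P i j := by
    intro i j; simp only [fpVal, mem_swap_map]
  simp only [hval]
  set K := PySem.Set.ofList T with hK
  set res0 := T.foldl (fun r i => r.insert i (PySem.Dict.empty : PySem.Dict String Int)) PySem.Dict.empty with hres0
  set res := T.foldl (fun r i => T.foldl (fun r j =>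
      r.modify i PySem.Dict.empty (fun d => d.insert j (fpVal C P i j))) r) res0 with hres
  have hkeys0 : res0.keys = K := by
    rw [hres0]
    have := PySem.Dict.keys_foldl_insert T
      (fun _ _ => (PySem.Dict.empty : PySem.Dict String Int)) PySem.Dict.empty
    simpa [PySem.Dict.keys_empty, PySem.Set.update_nil_left] using this
  have hkeysA : res.keys = K := by
    rw [hres]
    refine keys_foldl_inv T _ K (fun r i hi hr => ?_) res0 hkeys0
    refine keys_foldl_inv T _ K (fun r' j _ hr' => ?_) r hr
    rw [keys_modify_mem r' i _ _ (hr' ▸ (PySem.Set.mem_ofList T i).mpr hi), hr']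
  have hget : ∀ k ∈ T, res.getD k PySem.Dict.empty = fpRow C P T k := by
    intro k hkT
    rw [hres]
    rw [outerA_getD T T (fpVal C P) res0 k (Or.inl (by
      rw [hres0, getD_foldl_insert_const]
      split_ifs; simp))]
    rw [if_pos hkT]; rfl
  rw [PySem.Dict.items_eq_map_keys res (hkeysA ▸ PySem.Set.nodup_ofList T) PySem.Dict.empty,
    hkeysA, List.map_map, fpOut]
  apply List.map_congr_left
  intro k hk
  simp only [Function.comp]
  rw [hget k ((PySem.Set.mem_ofList T k).mp hk)]

lemma B_eq (C P : List (String × String)) (T : List String) :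
    getFootprint_alt C P T = fpOut C P T := by
  simp only [getFootprint_alt]
  set K := PySem.Set.ofList T with hK
  set zrow := T.foldl (fun d j => d.insert j (0 : Int)) PySem.Dict.empty with hzrow
  set res0 := T.foldl (fun r i => r.insert i zrow) PySem.Dict.empty with hres0
  have hkeys0 : res0.keys = K := by
    rw [hres0]
    have := PySem.Dict.keys_foldl_insert T (fun _ _ => zrow) PySem.Dict.empty
    simpa [PySem.Dict.keys_empty, PySem.Set.update_nil_left] using this
  obtain ⟨hK1, hG1⟩ := passB C Prod.snd Prod.fst 2 K res0 hkeys0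
  set res1 := C.foldl (fun r p => if r.contains p.2 && r.contains p.1
    then r.modify p.2 PySem.Dict.empty (fun d => d.insert p.1 2) else r) res0 with hres1
  obtain ⟨hK2, hG2⟩ := passB P Prod.fst Prod.snd 3 K res1 hK1
  set res2 := P.foldl (fun r p => if r.contains p.1 && r.contains p.2
    then r.modify p.1 PySem.Dict.empty (fun d => d.insert p.2 3) else r) res1 with hres2
  obtain ⟨hK3, hG3⟩ := passB C Prod.fst Prod.snd 1 K res2 hK2
  set res3 := C.foldl (fun r p => if r.contains p.1 && r.contains p.2
    then r.modify p.1 PySem.Dict.empty (fun d => d.insert p.2 1) else r) res2 with hres3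
  have hzkeys : zrow.keys = K := by
    rw [hzrow]
    have := PySem.Dict.keys_foldl_insert T (fun _ _ => (0 : Int)) PySem.Dict.empty
    simpa [PySem.Dict.keys_empty, PySem.Set.update_nil_left] using this
  have hget : ∀ k ∈ K, res3.getD k PySem.Dict.empty = fpRow C P T k := by
    intro k hkK
    have hkT : k ∈ T := (PySem.Set.mem_ofList T k).mp hkK
    rw [hG3 k, hG2 k, hG1 k]
    rw [show res0.getD k PySem.Dict.empty = zrow from by
      rw [hres0, getD_foldl_insert_const, if_pos hkT]]
    -- the row B builds for k equals the canonical row, by extensionality on items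
    set c1 : String × String → Prop := fun p => (p.2 ∈ K ∧ p.1 ∈ K) ∧ p.2 = k with hc1
    set c2 : String × String → Prop := fun p => (p.1 ∈ K ∧ p.2 ∈ K) ∧ p.1 = k with hc2
    set f1 := C.foldl (fun d p => if c1 p then d.insert p.1 2 else d) zrow with hf1
    set f2 := P.foldl (fun d p => if c2 p then d.insert p.2 3 else d) f1 with hf2
    set f3 := C.foldl (fun d p => if c2 p then d.insert p.2 1 else d) f2 with hf3
    have hkeysf1 : f1.keys = K :=
      keys_foldl_cond_insert C c1 Prod.fst 2 K (fun p hp => hp.1.2) zrow hzkeys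
    have hkeysf2 : f2.keys = K :=
      keys_foldl_cond_insert P c2 Prod.snd 3 K (fun p hp => hp.1.2) f1 hkeysf1
    have hkeysf3 : f3.keys = K :=
      keys_foldl_cond_insert C c2 Prod.snd 1 K (fun p hp => hp.1.2) f2 hkeysf2
    have hrowkeys : (fpRow C P T k).keys = K := by
      rw [fpRow]
      have := PySem.Dict.keys_foldl_insert T (fun _ j => fpVal C P k j) PySem.Dict.empty
      simpa [PySem.Dict.keys_empty, PySem.Set.update_nil_left] using this
    have hgetf3 : ∀ j ∈ K, f3.getD j 0 = fpVal C P k j := by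
      intro j hjK
      have hjT : j ∈ T := (PySem.Set.mem_ofList T j).mp hjK
      rw [hf3, getD_foldl_cond_insert, hf2, getD_foldl_cond_insert, hf1, getD_foldl_cond_insert]
      have e1 : (∃ p ∈ C, c2 p ∧ p.2 = j) ↔ (k, j) ∈ C := by
        constructor
        · rintro ⟨p, hp, ⟨⟨_, _⟩, h1⟩, h2⟩
          have : p = (k, j) := Prod.ext h1 h2
          exact this ▸ hp
        · intro h; exact ⟨(k, j), h, ⟨⟨hkK, hjK⟩, rfl⟩, rfl⟩
      have e2 : (∃ p ∈ P, c2 p ∧ p.2 = j) ↔ (k, j) ∈ P := by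
        constructor
        · rintro ⟨p, hp, ⟨⟨_, _⟩, h1⟩, h2⟩
          have : p = (k, j) := Prod.ext h1 h2
          exact this ▸ hp
        · intro h; exact ⟨(k, j), h, ⟨⟨hkK, hjK⟩, rfl⟩, rfl⟩
      have e3 : (∃ p ∈ C, c1 p ∧ p.1 = j) ↔ (j, k) ∈ C := by
        constructor
        · rintro ⟨p, hp, ⟨⟨_, _⟩, h1⟩, h2⟩
          have : p = (j, k) := Prod.ext h2 h1
          exact this ▸ hp
        · intro h; exact ⟨(j, k), h, ⟨⟨hkK, hjK⟩, rfl⟩, rfl⟩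
      have hz : zrow.getD j 0 = 0 := by
        rw [hzrow, getD_foldl_insert_const]
        split_ifs; simp
      rw [fpVal]
      simp only [e1, e2, e3, hz]
    apply PySem.Dict.ext
    rw [PySem.Dict.items_eq_map_keys f3 (hkeysf3 ▸ PySem.Set.nodup_ofList T) 0,
      PySem.Dict.items_eq_map_keys (fpRow C P T k) (hrowkeys ▸ PySem.Set.nodup_ofList T) 0,
      hkeysf3, hrowkeys]
    apply List.map_congr_left
    intro j hj
    rw [hgetf3 j hj, fpRow, getD_foldl_insert_fun,
      if_pos ((PySem.Set.mem_ofList T j).mp hj)]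
  rw [PySem.Dict.items_eq_map_keys res3 (hK3 ▸ PySem.Set.nodup_ofList T) PySem.Dict.empty,
    hK3, List.map_map, fpOut]
  apply List.map_congr_left
  intro k hk
  simp only [Function.comp]
  rw [hget k hk]

-- ===== VERDICT (by name: the statement is the Claim_ definition above) =====
theorem getFootprint_spec : Claim_equal_getFootprint := by
  intro C P T _
  unfold Spec_getFootprint
  rw [A_eq, B_eq]
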